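-- pv_equiv track=rewrite | github.com/nusparktech/bookbot | main.py | count_all_chars
-- ===== SOURCE A (Python) =====
-- def count_all_chars(q):
--     counts = {}
--     string = list(q)
--
--     for c in string:
--         if c.isprintable() and c.isalpha():
--             n = c.lower()
--             counts[n] = counts.get(n, 0) + 1
--     return counts
-- ===== SOURCE B (Python) =====
-- def count_all_chars(q):
--     kept = [c.lower() for c in q if c.isprintable() and c.isalpha()]
--     return {ch: kept.count(ch) for ch in dict.fromkeys(kept)}
-- ===== Notes on version B (the rewrite author's own statement) =====
-- stated objective: alternative
-- what changed: Replaces the single hash-accumulating pass (dict.get+insert per character) with a filter/map pass collecting the lowered letters, then an ordered dedup (dict.fromkeys) with list.count per distinct letter.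
import Mathlib
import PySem

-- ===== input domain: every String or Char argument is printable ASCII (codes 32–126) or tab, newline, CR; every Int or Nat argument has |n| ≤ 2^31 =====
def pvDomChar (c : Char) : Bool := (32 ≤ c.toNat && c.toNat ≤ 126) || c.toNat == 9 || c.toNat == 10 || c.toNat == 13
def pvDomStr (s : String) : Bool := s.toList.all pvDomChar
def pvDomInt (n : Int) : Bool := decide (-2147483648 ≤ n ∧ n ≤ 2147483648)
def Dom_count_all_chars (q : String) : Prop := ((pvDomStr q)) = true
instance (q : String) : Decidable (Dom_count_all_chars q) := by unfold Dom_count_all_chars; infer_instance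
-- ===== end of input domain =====

-- B is an alternative decomposition: filter/map the lowered letters once, then ordered dedup + count
-- per distinct letter, instead of A's per-character dict.get/insert accumulation (return value only).

-- c.isprintable(): exact on the Dom characters (printable ASCII 32–126; tab/newline/CR are not printable)
def pyIsPrintable (c : Char) : Bool := 32 ≤ c.toNat && c.toNat ≤ 126

-- ===== PORT A =====
def count_all_chars (q : String) : List (String × Int) :=
  (q.toList.foldl
    (fun (counts : PySem.Dict String Int) c =>
      if pyIsPrintable c && PySem.Chars.isalpha c then
        let n := String.ofList [PySem.Chars.lowerChar c]
        counts.insert n (counts.getD n 0 + 1)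
      else counts)
    PySem.Dict.empty).items

-- ===== PORT B =====
def count_all_chars_alt (q : String) : List (String × Int) :=
  let kept := (q.toList.filter (fun c => pyIsPrintable c && PySem.Chars.isalpha c)).map
    (fun c => String.ofList [PySem.Chars.lowerChar c])
  -- dict comprehension over dict.fromkeys(kept): keys are distinct and in first-occurrence order,
  -- so the resulting dict's items are exactly this map
  (PySem.List.dedup kept).map (fun ch => (ch, (kept.count ch : Int)))

-- ===== PRECONDITION & SPEC =====
def Spec_count_all_chars (q : String) (out : List (String × Int)) : Prop := out = count_all_chars_alt q
instance (q : String) (out : List (String × Int)) : Decidable (Spec_count_all_chars q out) := by unfold Spec_count_all_chars; infer_instance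

-- ===== CLAIM (what is proved, stated in full; the proofs are below) =====
def Claim_equal_count_all_chars : Prop := ∀ (q : String), Dom_count_all_chars q → Spec_count_all_chars q (count_all_chars q)

-- ===== LEMMAS AND PROOFS =====

-- ===== VERDICT (by name: the statement is the Claim_ definition above) =====
theorem count_all_chars_spec : Claim_equal_count_all_chars := by
  intro q _
  show count_all_chars q = count_all_chars_alt q
  simp only [count_all_chars, count_all_chars_alt]
  rw [PySem.List.foldl_if_eq_foldl_filter, PySem.List.dedup_eq_ofList,
      ← PySem.Dict.items_counter, ← PySem.Dict.foldl_insert_getD_add_one_eq_counter,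
      List.foldl_map]
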